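-- pv_equiv track=rewrite | github.com/sungikje/_algorithm | 프로그래머스/1/135808. 과일 장수/과일 장수.py | solution
-- ===== SOURCE A (Python) =====
-- def solution(k, m, score):
--     answer = 0
--
--     score.sort()
--     eachBoxMin = []
--     count = 0
--     min = 9
--
--     for i in range(len(score)-1,-1,-1):
--         if score[i] <= min:
--             min = score[i]
--             count += 1
--             if count == m:
--                 eachBoxMin.append(min)
--                 count = 0
--     for i in eachBoxMin:
--         answer += i*m
--
--     return answer
-- ===== SOURCE B (Python) =====
-- def solution(k, m, score):
--     s = sorted(score)[::-1]
--     return m * sum(s[i] for i in range(m - 1, len(s), m))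
-- ===== Notes on version B (the rewrite author's own statement) =====
-- stated objective: simpler
-- what changed: B replaces A's stateful reverse index scan (running min + box counter + a second accumulation loop) by a closed form: sort descending and sum every m-th element starting at index m-1 (the minima of the full boxes) over a strided range, returning m times that sum.
-- outside the precondition, e.g. on solution(9, 0, [5, 5]): A returns 0, B raises ValueError; on solution(9, 2, [10, 10]): A returns 0, B returns 20
import Mathlib
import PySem

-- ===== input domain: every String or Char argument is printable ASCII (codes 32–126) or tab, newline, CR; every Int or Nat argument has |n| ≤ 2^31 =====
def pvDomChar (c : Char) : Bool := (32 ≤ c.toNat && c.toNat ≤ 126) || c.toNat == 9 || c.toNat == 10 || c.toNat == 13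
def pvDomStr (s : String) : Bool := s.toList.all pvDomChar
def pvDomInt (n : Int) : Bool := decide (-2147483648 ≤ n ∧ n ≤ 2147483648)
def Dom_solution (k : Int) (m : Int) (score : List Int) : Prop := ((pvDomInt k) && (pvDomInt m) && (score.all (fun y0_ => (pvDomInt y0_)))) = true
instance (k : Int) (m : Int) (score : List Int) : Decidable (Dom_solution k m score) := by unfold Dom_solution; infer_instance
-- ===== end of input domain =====

-- B computes the same box total by a closed form (sort descending, sum every m-th element — the box
-- minima — over a strided range, multiply by m) instead of A's stateful reverse index scan; objective: simpler.
-- A sorts `score` in place (observable mutation); B does not — the equivalence proved is about the return value.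

-- ===== PORT A =====
def solution (k : Int) (m : Int) (score : List Int) : Int :=
  let s := PySem.List.sorted score (fun x => x) false   -- score.sort()
  -- state = (eachBoxMin, count, min); i is always a valid index of s, so the default of pyGetD is never used
  let st := (PySem.List.pyRange ((s.length : Int) - 1) (-1) (-1)).foldl
    (fun (acc : List Int × Int × Int) i =>
      if PySem.List.pyGetD s i 0 ≤ acc.2.2 then
        if acc.2.1 + 1 = m then (acc.1 ++ [PySem.List.pyGetD s i 0], 0, PySem.List.pyGetD s i 0)
        else (acc.1, acc.2.1 + 1, PySem.List.pyGetD s i 0)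
      else acc)
    ([], 0, 9)
  st.1.foldl (fun a i => a + i * m) 0

-- ===== PORT B =====
def solution_alt (k : Int) (m : Int) (score : List Int) : Int :=
  -- s = sorted(score)[::-1]
  match PySem.List.slice? (PySem.List.sorted score (fun x => x) false) none none (-1) with
  | none => 0   -- unreachable: step -1 ≠ 0
  | some s =>
    -- m * sum(s[i] for i in range(m - 1, len(s), m)); Python raises ValueError for m = 0 (excluded
    -- by Pre_solution), where pyRange returns [] and the port returns 0
    m * ((PySem.List.pyRange (m - 1) (s.length : Int) m).map (fun i => PySem.List.pyGetD s i 0)).sum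

-- ===== PRECONDITION & SPEC =====
-- Pre_ excludes m = 0 (A's 0 there is an artefact of its counter never reaching m; B's range step
-- raises ValueError) and inputs with 1 ≤ m ≤ len(score) holding a score above 9 — outside the
-- original problem's 1..k, k ≤ 9 score domain — where A's `min = 9` initialiser silently drops elements.
def Pre_solution (k : Int) (m : Int) (score : List Int) : Prop :=
  m ≠ 0 ∧ (m ≤ -1 ∨ (∀ x ∈ score, x ≤ 9) ∨ (score.length : Int) < m)
instance (k : Int) (m : Int) (score : List Int) : Decidable (Pre_solution k m score) := by
  unfold Pre_solution; infer_instance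

def pvWitness_solution : Int × Int × List Int := (9, 3, [1, 2, 3, 1, 2, 3, 1])

def Spec_solution (k : Int) (m : Int) (score : List Int) (out : Int) : Prop := out = solution_alt k m score
instance (k : Int) (m : Int) (score : List Int) (out : Int) : Decidable (Spec_solution k m score out) := by unfold Spec_solution; infer_instance

-- ===== CLAIM (what is proved, stated in full; the proofs are below) =====
def Claim_equal_solution : Prop := ∀ (k : Int) (m : Int) (score : List Int), Dom_solution k m score → Pre_solution k m score → Spec_solution k m score (solution k m score)

-- ===== LEMMAS AND PROOFS =====

-- the box minima A collects, mirrored as a structural recursion over the descending list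
def gmins (m c : Int) : List Int → List Int
  | [] => []
  | v :: t => if c + 1 = m then v :: gmins m 0 t else gmins m (c + 1) t

-- on a nonincreasing list bounded by the running min, A's loop is a plain modular counter
theorem loopA_eq_gmins (m : Int) (r : List Int) : ∀ (ebm : List Int) (c mn : Int),
    (∀ x ∈ r, x ≤ mn) → r.Pairwise (fun a b => b ≤ a) →
    (r.foldl
      (fun (acc : List Int × Int × Int) v =>
        if v ≤ acc.2.2 then
          if acc.2.1 + 1 = m then (acc.1 ++ [v], 0, v) else (acc.1, acc.2.1 + 1, v)
        else acc)
      (ebm, c, mn)).1 = ebm ++ gmins m c r := by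
  induction r with
  | nil => intro ebm c mn _ _; simp [gmins]
  | cons v t ih =>
    intro ebm c mn hle hpw
    have hv : v ≤ mn := hle v (by simp)
    have hpw' := List.pairwise_cons.mp hpw
    simp only [List.foldl_cons, if_pos hv]
    by_cases hc : c + 1 = m
    · rw [if_pos hc, gmins, if_pos hc]
      rw [ih (ebm ++ [v]) 0 v hpw'.1 hpw'.2]
      simp
    · rw [if_neg hc, gmins, if_neg hc]
      exact ih ebm (c + 1) v (fun x hx => hpw'.1 x hx) hpw'.2

-- when the counter can never reach m (m ≤ 0, or fewer elements remain than needed), nothing is appended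
theorem loopA_short (m : Int) (r : List Int) : ∀ (ebm : List Int) (c mn : Int),
    0 ≤ c → (m ≤ 0 ∨ c + (r.length : Int) < m) →
    (r.foldl
      (fun (acc : List Int × Int × Int) v =>
        if v ≤ acc.2.2 then
          if acc.2.1 + 1 = m then (acc.1 ++ [v], 0, v) else (acc.1, acc.2.1 + 1, v)
        else acc)
      (ebm, c, mn)).1 = ebm := by
  induction r with
  | nil => intro ebm c mn _ _; rfl
  | cons v t ih =>
    intro ebm c mn hc hor
    have hlen : ((v :: t).length : Int) = (t.length : Int) + 1 := by
      push_cast [List.length_cons]; ring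
    have hor' : m ≤ 0 ∨ c + 1 + (t.length : Int) < m := by
      rcases hor with h | h
      · exact Or.inl h
      · right; rw [hlen] at h; omega
    have hor'' : m ≤ 0 ∨ c + (t.length : Int) < m := by
      rcases hor with h | h
      · exact Or.inl h
      · right; rw [hlen] at h; omega
    have hne : ¬ (c + 1 = m) := by rcases hor' with h | h <;> omega
    simp only [List.foldl_cons]
    by_cases hv : v ≤ mn
    · rw [if_pos hv, if_neg hne]
      exact ih ebm (c + 1) v (by omega) hor'
    · rw [if_neg hv]
      exact ih ebm c mn hc hor''

-- gmins with counter c picks the element at offset m-c-1 and restarts after a full box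
theorem gmins_unfold_gen (m : Int) (r : List Int) : ∀ (c : Int), 0 ≤ c → c < m →
    gmins m c r = if (r.length : Int) < m - c then [] else
      r.getD (m - c - 1).toNat 0 :: gmins m 0 (r.drop (m - c).toNat) := by
  induction r with
  | nil => intro c h0 hc; rw [if_pos (by simpa using sub_pos.mpr hc)]; rfl
  | cons v t ih =>
    intro c h0 hc
    by_cases hcm : c + 1 = m
    · have h1 : m - c = 1 := by omega
      rw [gmins, if_pos hcm, if_neg (by simp [h1])]
      simp [h1]
    · rw [gmins, if_neg hcm, ih (c + 1) (by omega) (by omega)]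
      have e1b : m - (c + 1) - 1 = m - c - 2 := by omega
      have e1 : m - (c + 1) = m - c - 1 := by omega
      rw [e1b, e1]
      have e2 : ((v :: t).length : Int) < m - c ↔ (t.length : Int) < m - c - 1 := by
        simp; omega
      by_cases hlt : (t.length : Int) < m - c - 1
      · rw [if_pos hlt, if_pos (e2.mpr hlt)]
      · rw [if_neg hlt, if_neg (fun h => hlt (e2.mp h))]
        have e5 : (m - c).toNat = (m - c - 1).toNat + 1 := by omega
        have e6 : (m - c - 1).toNat = (m - c - 2).toNat + 1 := by omega
        rw [e6]
        conv_rhs => rw [e5, e6]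
        simp [List.getD]

-- the strided index enumeration reads off exactly gmins' picks
theorem mappick_eq_gmins (m : Int) (hm : 1 ≤ m) : ∀ (n : Nat) (r : List Int), r.length = n →
    (List.range (((r.length : Int) / m).toNat)).map
        (fun (k : Nat) => PySem.List.pyGetD r ((m - 1) + m * (k : Int)) 0)
      = gmins m 0 r := by
  intro n
  induction n using Nat.strong_induction_on with
  | _ n ih =>
    intro r hlen
    by_cases hsmall : (r.length : Int) < m
    · have hq : ((r.length : Int) / m) = 0 := Int.ediv_eq_zero_of_lt (by positivity) hsmall
      rw [hq, gmins_unfold_gen m r 0 le_rfl (by omega), if_pos (by simpa using hsmall)]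
      simp
    · have hsm : m ≤ (r.length : Int) := by omega
      have hm0 : m ≠ 0 := by omega
      have hq : (r.length : Int) / m = ((r.length : Int) - m) / m + 1 := by
        have h := Int.add_mul_ediv_right ((r.length : Int) - m) 1 hm0
        simpa using h
      have hnn : 0 ≤ ((r.length : Int) - m) / m := Int.ediv_nonneg (by omega) (by omega)
      have hq2 : ((r.length : Int) / m).toNat = (((r.length : Int) - m) / m).toNat + 1 := by omega
      rw [hq2, List.range_succ_eq_map, List.map_cons, List.map_map]
      have hlt0 : (m - 1).toNat < r.length := by omega
      simp only [Nat.cast_zero, mul_zero, add_zero]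
      rw [PySem.List.pyGetD_eq_getElem r 0 (by omega) (by omega)]
      have hdrop : ∀ (k : Nat), (k : Int) < ((r.length : Int) - m) / m →
          PySem.List.pyGetD r ((m - 1) + m * ((k : Nat).succ : Int)) 0
            = PySem.List.pyGetD (r.drop m.toNat) ((m - 1) + m * (k : Int)) 0 := by
        intro k hk
        have hj0 : 0 ≤ (m - 1) + m * (k : Int) := by
          have h1 : (0:Int) ≤ m * (k : Int) := mul_nonneg (by omega) (by positivity)
          omega
        have hjb : (m - 1) + m * (k : Int) < (r.length : Int) - m := by
          have h2 : m * ((k : Int) + 1) ≤ m * (((r.length : Int) - m) / m) :=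
            mul_le_mul_of_nonneg_left (by omega) (by omega)
          have h3 : ((r.length : Int) - m) / m * m ≤ (r.length : Int) - m :=
            Int.ediv_mul_le _ hm0
          nlinarith
        have hsucc : (m - 1) + m * ((k : Nat).succ : Int) = m + ((m - 1) + m * (k : Int)) := by
          push_cast; ring
        have hdl : ((r.drop m.toNat).length : Int) = (r.length : Int) - m := by
          simp [List.length_drop]; omega
        rw [hsucc, PySem.List.pyGetD_eq_getElem r 0 (by omega) (by omega),
          PySem.List.pyGetD_eq_getElem (r.drop m.toNat) 0 (by omega) (by omega)]
        rw [List.getElem_drop]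
        congr 1
        omega
      have hrec := ih (r.drop m.toNat).length (by simp [List.length_drop]; omega) (r.drop m.toNat) rfl
      have hdl : ((r.drop m.toNat).length : Int) = (r.length : Int) - m := by
        simp [List.length_drop]; omega
      rw [hdl] at hrec
      have htail : (List.range ((((r.length : Int) - m) / m).toNat)).map
            ((fun (k : Nat) => PySem.List.pyGetD r ((m - 1) + m * (k : Int)) 0) ∘ Nat.succ)
          = gmins m 0 (r.drop m.toNat) := by
        rw [← hrec]
        refine List.map_congr_left (fun k hk => ?_)
        have hk' : (k : Int) < ((r.length : Int) - m) / m := by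
          have := List.mem_range.mp hk; omega
        exact hdrop k hk'
      rw [gmins_unfold_gen m r 0 le_rfl (by omega), if_neg (by omega)]
      rw [htail]
      simp only [sub_zero]
      rw [List.getD_eq_getElem r 0 hlt0]

-- B's strided range reads exactly the list of box minima
theorem pyrangepick_eq_gmins (m : Int) (hm : 1 ≤ m) (r : List Int) :
    (PySem.List.pyRange (m - 1) (r.length : Int) m).map (fun i => PySem.List.pyGetD r i 0)
      = gmins m 0 r := by
  rw [PySem.List.pyRange_of_pos _ _ (by omega)]
  rw [List.map_map]
  by_cases hb : m - 1 < (r.length : Int)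
  · rw [if_pos hb]
    have harg : (r.length : Int) - (m - 1) + m - 1 = (r.length : Int) := by ring
    rw [harg]
    exact mappick_eq_gmins m hm r.length r rfl
  · rw [if_neg hb]
    rw [gmins_unfold_gen m r 0 le_rfl (by omega), if_pos (by omega)]
    simp
-- for m ≤ -1 the range is empty (start m-1 is below the nonnegative stop with a negative step)
theorem pyRange_neg_empty (m : Int) (hm : m ≤ -1) (n : Nat) :
    PySem.List.pyRange (m - 1) (n : Int) m = [] := by
  unfold PySem.List.pyRange
  rw [if_neg (by omega : ¬ m = 0), if_neg (by omega : ¬ (0:Int) < m),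
    if_neg (by omega : ¬ (n : Int) < m - 1)]
  simp

-- A's reverse index loop is the value loop over the reversed sorted list
theorem loopA_fold_reverse (m : Int) (s : List Int) (init : List Int × Int × Int) :
    ((PySem.List.pyRange ((s.length : Int) - 1) (-1) (-1)).foldl
      (fun (acc : List Int × Int × Int) i =>
        if PySem.List.pyGetD s i 0 ≤ acc.2.2 then
          if acc.2.1 + 1 = m then (acc.1 ++ [PySem.List.pyGetD s i 0], 0, PySem.List.pyGetD s i 0)
          else (acc.1, acc.2.1 + 1, PySem.List.pyGetD s i 0)
        else acc)
      init)
      = (s.reverse.foldl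
      (fun (acc : List Int × Int × Int) v =>
        if v ≤ acc.2.2 then
          if acc.2.1 + 1 = m then (acc.1 ++ [v], 0, v) else (acc.1, acc.2.1 + 1, v)
        else acc)
      init) := by
  rw [PySem.List.pyRange_neg_one_eq_reverse, show (-1 : Int) + 1 = 0 from by ring,
    show (s.length : Int) - 1 + 1 = (s.length : Int) from by ring]
  have h1 : (PySem.List.pyRange 0 (s.length : Int)).reverse.map (fun j => PySem.List.pyGetD s j 0)
      = s.reverse := by
    rw [List.map_reverse, PySem.List.map_pyGetD_pyRange_zero' s 0]
  rw [← h1, List.foldl_map]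

-- ===== VERDICT (by name: the statement is the Claim_ definition above) =====
theorem solution_spec : Claim_equal_solution := by
  intro k m score _ hpre
  obtain ⟨hm0, hdisj⟩ := hpre
  by_cases hm1 : 1 ≤ m
  · -- B = m * sum of the box minima
    have hB : solution_alt k m score
        = m * (gmins m 0 ((PySem.List.sorted score (fun x => x) false).reverse)).sum := by
      simp only [solution_alt, PySem.List.slice?_none_none_neg_one]
      rw [pyrangepick_eq_gmins m hm1]
    unfold Spec_solution solution
    dsimp only
    rw [hB, loopA_fold_reverse]
    set s := PySem.List.sorted score (fun x => x) false with hs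
    by_cases hall : ∀ x ∈ score, x ≤ 9
    · rw [loopA_eq_gmins m s.reverse [] 0 9
        (fun x hx => hall x ((PySem.List.mem_sorted score _ false x).mp (List.mem_reverse.mp hx)))
        (List.pairwise_reverse.mpr (PySem.List.sorted_pairwise score (fun x => x)))]
      rw [List.nil_append, PySem.List.foldl_add _ (fun i => i * m) 0]
      rw [List.sum_map_mul_right _ (fun i => i) m]
      simp [mul_comm]
    · have hlen : (score.length : Int) < m := by
        rcases hdisj with h | h | h
        · omega
        · exact absurd h hall
        · exact h
      have hrl : ((s.reverse).length : Int) = (score.length : Int) := by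
        simp [hs, PySem.List.length_sorted]
      rw [loopA_short m s.reverse [] 0 9 le_rfl (Or.inr (by omega))]
      rw [gmins_unfold_gen m s.reverse 0 le_rfl (by omega), if_pos (by omega)]
      simp
  · -- m ≤ -1: both sides are 0
    have hmneg : m ≤ -1 := by omega
    have hB : solution_alt k m score = 0 := by
      simp only [solution_alt, PySem.List.slice?_none_none_neg_one]
      rw [pyRange_neg_empty m hmneg]
      simp
    unfold Spec_solution solution
    dsimp only
    rw [hB, loopA_fold_reverse]
    rw [loopA_short m _ [] 0 9 le_rfl (Or.inl (by omega))]
    rfl
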